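-- pv_equiv track=rewrite | github.com/Nriver/leetcode | 1529. Bulb Switcher IV.py | minFlips1
-- ===== SOURCE A (Python) =====
-- def minFlips1(target: str) -> int:
--     prev = '0'
--     res = 0
--     for x in target:
--         if x != prev:
--             res += 1
--             prev = x
--     return res
-- ===== SOURCE B (Python) =====
-- def minFlips1(target: str) -> int:
--     # Count maximal runs of equal characters in '0' + target; answer = runs - 1.
--     s = '0' + target
--     count = 0
--     i = 0
--     while i < len(s):
--         j = i
--         while j < len(s) and s[j] == s[i]:
--             j += 1
--         count += 1
--         i = j
--     return count - 1
-- ===== Notes on version B (the rewrite author's own statement) =====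
-- stated objective: alternative
-- what changed: B prepends '0' and counts maximal runs of equal characters by skipping each run with an inner scan (answer = runs - 1), instead of threading a prev variable and incrementing on each change.
import Mathlib
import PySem

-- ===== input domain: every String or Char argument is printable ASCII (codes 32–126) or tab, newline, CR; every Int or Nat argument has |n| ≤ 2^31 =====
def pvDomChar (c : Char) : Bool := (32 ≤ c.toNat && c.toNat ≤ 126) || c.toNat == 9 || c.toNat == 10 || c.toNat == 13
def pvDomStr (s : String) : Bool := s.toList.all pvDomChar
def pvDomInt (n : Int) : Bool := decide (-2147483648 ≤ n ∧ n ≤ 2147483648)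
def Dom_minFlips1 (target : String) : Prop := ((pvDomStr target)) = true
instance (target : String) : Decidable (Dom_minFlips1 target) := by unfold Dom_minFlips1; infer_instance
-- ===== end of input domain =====

-- B groups '0' ++ target into maximal runs of equal characters and returns (#runs - 1);
-- A threads a prev character and counts changes. Same value, different decomposition.

-- ===== PORT A =====
def minFlips1 (target : String) : Int :=
  (target.toList.foldl
    (fun (s : Char × Int) x => if x ≠ s.1 then (x, s.2 + 1) else s)
    (('0' : Char), (0 : Int))).2

-- ===== PORT B =====
-- maximal runs of equal characters (like the run-skipping while loops in Source B)
def pvRuns : List Char → List (List Char)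
  | [] => []
  | x :: xs => (x :: xs.takeWhile (· == x)) :: pvRuns (xs.dropWhile (· == x))
termination_by l => l.length
decreasing_by
  simp only [List.length_cons]
  exact Nat.lt_succ_of_le (List.length_dropWhile_le _ _)

def minFlips1_alt (target : String) : Int :=
  ((pvRuns ('0' :: target.toList)).length : Int) - 1

-- ===== PRECONDITION & SPEC =====
def Spec_minFlips1 (target : String) (out : Int) : Prop := out = minFlips1_alt target
instance (target : String) (out : Int) : Decidable (Spec_minFlips1 target out) := by unfold Spec_minFlips1; infer_instance

-- ===== CLAIM (what is proved, stated in full; the proofs are below) =====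
def Claim_equal_minFlips1 : Prop := ∀ (target : String), Dom_minFlips1 target → Spec_minFlips1 target (minFlips1 target)

-- ===== LEMMAS AND PROOFS =====

-- number of adjacent changes starting from prev character c
def pvChanges : Char → List Char → Int
  | _, [] => 0
  | c, x :: xs => (if x ≠ c then 1 else 0) + pvChanges x xs

theorem pvFoldA (l : List Char) : ∀ (c : Char) (r : Int),
    (l.foldl (fun (s : Char × Int) x => if x ≠ s.1 then (x, s.2 + 1) else s) (c, r)).2
      = r + pvChanges c l := by
  induction l with
  | nil => intro c r; simp [pvChanges]
  | cons x xs ih =>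
    intro c r
    by_cases h : x = c
    · subst h
      rw [List.foldl_cons, if_neg (by simp), ih]
      simp [pvChanges]
    · simp only [List.foldl_cons, pvChanges, ne_eq, h, not_false_eq_true, if_true]
      rw [ih]
      ring

theorem pvRuns_len (l : List Char) : ∀ (c : Char),
    ((pvRuns (c :: l)).length : Int) - 1 = pvChanges c l := by
  induction l with
  | nil => intro c; simp [pvRuns, pvChanges]
  | cons x xs ih =>
    intro c
    by_cases h : x = c
    · subst h
      have h1 : pvRuns (x :: x :: xs) = (x :: x :: xs.takeWhile (· == x)) :: pvRuns (xs.dropWhile (· == x)) := by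
        simp [pvRuns]
      have h2 : pvRuns (x :: xs) = (x :: xs.takeWhile (· == x)) :: pvRuns (xs.dropWhile (· == x)) := by
        simp [pvRuns]
      simp only [pvChanges, ne_eq, not_true_eq_false, if_false, zero_add, h1, List.length_cons]
      rw [← ih x, h2]
      simp
    · have h1 : pvRuns (c :: x :: xs) = [c] :: pvRuns (x :: xs) := by
        simp [pvRuns, h]
      simp only [pvChanges, ne_eq, h, not_false_eq_true, if_true, h1, List.length_cons]
      rw [← ih x]
      push_cast
      ring

-- ===== VERDICT (by name: the statement is the Claim_ definition above) =====
theorem minFlips1_spec : Claim_equal_minFlips1 := by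
  intro target _
  unfold Spec_minFlips1 minFlips1 minFlips1_alt
  rw [pvFoldA, ← pvRuns_len]
  ring
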